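-- pv_equiv track=rewrite | github.com/chutian1303-bot/aistore | scripts/build_apple_kb.py | extract_balanced_div
-- ===== SOURCE A (Python) =====
-- def extract_balanced_div(html: str, start_idx: int) -> str:
--     i = start_idx
--     depth = 0
--     n = len(html)
--
--     while i < n:
--         open_idx = html.find('<div', i)
--         close_idx = html.find('</div', i)
--
--         if open_idx == -1 and close_idx == -1:
--             return html[start_idx:]
--
--         if open_idx != -1 and (close_idx == -1 or open_idx < close_idx):
--             end = html.find('>', open_idx)
--             if end == -1:
--                 return html[start_idx:]
--             depth += 1
--             i = end + 1
--             continue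
--
--         end = html.find('>', close_idx)
--         if end == -1:
--             return html[start_idx:]
--         depth -= 1
--         i = end + 1
--
--         if depth == 0:
--             return html[start_idx:i]
--
--     return html[start_idx:]
-- ===== SOURCE B (Python) =====
-- def extract_balanced_div(html: str, start_idx: int) -> str:
--     region = html[start_idx:]
--     depth = 0
--     pending = 0  # +1/-1: inside an open/close div tag, waiting for its '>'
--     for j, ch in enumerate(region):
--         if pending:
--             if ch == '>':
--                 depth += pending
--                 if pending < 0 and depth == 0:
--                     return region[:j + 1]
--                 pending = 0
--         elif region.startswith('</div', j):
--             pending = -1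
--         elif region.startswith('<div', j):
--             pending = 1
--     return region
-- ===== Notes on version B (the rewrite author's own statement) =====
-- stated objective: alternative
-- what changed: A repeatedly calls str.find for '<div', '</div' and '>' from the current position and compares the two hit positions each loop iteration; B slices the region html[start_idx:] once and makes a single left-to-right character pass over it, keeping a depth counter plus a pending-tag flag and testing tags with startswith at the current offset, returning region prefixes instead of html slices.
import Mathlib
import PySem

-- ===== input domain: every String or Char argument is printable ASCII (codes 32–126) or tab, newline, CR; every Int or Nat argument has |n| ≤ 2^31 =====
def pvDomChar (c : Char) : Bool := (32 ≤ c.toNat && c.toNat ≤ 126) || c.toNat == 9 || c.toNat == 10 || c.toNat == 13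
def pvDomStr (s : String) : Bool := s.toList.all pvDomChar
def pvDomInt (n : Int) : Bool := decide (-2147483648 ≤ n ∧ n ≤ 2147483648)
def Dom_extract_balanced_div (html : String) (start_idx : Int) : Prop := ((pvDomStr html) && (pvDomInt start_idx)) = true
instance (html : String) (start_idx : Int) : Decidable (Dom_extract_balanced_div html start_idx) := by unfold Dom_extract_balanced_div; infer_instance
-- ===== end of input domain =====

-- B replaces A's repeated paired `str.find` searches (re-scanned each iteration) by one
-- single left-to-right character pass over `html[start_idx:]` with a depth counter and a
-- pending-tag flag (objective: faster, one pass instead of repeated forward searches).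

-- ===== PORT A =====

-- lower bounds of a successful `str.find(sub, i)`; cited by edbLoop's decreasing_by
theorem edb_findFrom_lb (s sub : List Char) (st : Int)
    (h : PySem.Chars.findFrom s sub st none ≠ -1) :
    0 ≤ PySem.Chars.findFrom s sub st none ∧ st ≤ PySem.Chars.findFrom s sub st none := by
  simp only [PySem.Chars.findFrom] at h ⊢
  generalize hst : (if st < 0 then if st + (s.length:Int) < 0 then 0 else st + (s.length:Int) else st) = st' at h ⊢
  have ha := PySem.Chars.neg_one_le_find (List.drop st'.toNat (List.take ((s.length:Int)).toNat s)) sub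
  have hst' : st ≤ st' ∧ 0 ≤ st' ∨ st' = st := by split_ifs at hst <;> omega
  split_ifs at h ⊢ <;> omega

-- the while-loop of A (state i, depth); `start` fixed for the `html[start_idx:…]` slices
def edbLoop (hl : List Char) (start i depth : Int) : List Char :=
  if hi : i < (hl.length : Int) then
    let openIdx := PySem.Chars.findFrom hl ['<', 'd', 'i', 'v'] i none
    let closeIdx := PySem.Chars.findFrom hl ['<', '/', 'd', 'i', 'v'] i none
    if openIdx = -1 ∧ closeIdx = -1 then PySem.List.slice hl (some start) none
    else if hbr : openIdx ≠ -1 ∧ (closeIdx = -1 ∨ openIdx < closeIdx) then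
      let e := PySem.Chars.findFrom hl ['>'] openIdx none
      if he : e = -1 then PySem.List.slice hl (some start) none
      else edbLoop hl start (e + 1) (depth + 1)
    else
      let e := PySem.Chars.findFrom hl ['>'] closeIdx none
      if he : e = -1 then PySem.List.slice hl (some start) none
      else if depth - 1 = 0 then PySem.List.slice hl (some start) (some (e + 1))
      else edbLoop hl start (e + 1) (depth - 1)
  else PySem.List.slice hl (some start) none
termination_by ((hl.length : Int) - i).toNat
decreasing_by
  · have h1 := edb_findFrom_lb hl ['<', 'd', 'i', 'v'] i hbr.1
    have h2 := edb_findFrom_lb hl ['>'] (PySem.Chars.findFrom hl ['<', 'd', 'i', 'v'] i none) he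
    omega
  · have hc : PySem.Chars.findFrom hl ['<', '/', 'd', 'i', 'v'] i none ≠ -1 := by tauto
    have h1 := edb_findFrom_lb hl ['<', '/', 'd', 'i', 'v'] i hc
    have h2 := edb_findFrom_lb hl ['>'] (PySem.Chars.findFrom hl ['<', '/', 'd', 'i', 'v'] i none) he
    omega

def extract_balanced_div (html : String) (start_idx : Int) : String :=
  String.ofList (edbLoop html.toList start_idx start_idx 0)

-- ===== PORT B =====

def edbOpenTag : List Char := ['<', 'd', 'i', 'v']
def edbCloseTag : List Char := ['<', '/', 'd', 'i', 'v']

-- the `for j, ch in enumerate(region)` loop of B: one char at a time, carrying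
-- (j, pending, depth); `region.startswith(tag, j)` is a prefix test on the remaining chars
def edbScan (region : List Char) : List Char → Nat → Int → Int → List Char
  | [], _, _, _ => region
  | ch :: rest, j, pending, depth =>
    if pending ≠ 0 then
      if ch = '>' then
        let depth' := depth + pending
        if pending < 0 ∧ depth' = 0 then region.take (j + 1)
        else edbScan region rest (j + 1) 0 depth'
      else edbScan region rest (j + 1) pending depth
    else if PySem.Chars.startswith (ch :: rest) edbCloseTag then edbScan region rest (j + 1) (-1) depth
    else if PySem.Chars.startswith (ch :: rest) edbOpenTag then edbScan region rest (j + 1) 1 depth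
    else edbScan region rest (j + 1) 0 depth

def extract_balanced_div_alt (html : String) (start_idx : Int) : String :=
  let region := PySem.List.slice html.toList (some start_idx) none
  String.ofList (edbScan region region 0 0 0)

-- ===== PRECONDITION & SPEC =====
def Spec_extract_balanced_div (html : String) (start_idx : Int) (out : String) : Prop := out = extract_balanced_div_alt html start_idx
instance (html : String) (start_idx : Int) (out : String) : Decidable (Spec_extract_balanced_div html start_idx out) := by unfold Spec_extract_balanced_div; infer_instance

-- ===== CLAIM (what is proved, stated in full; the proofs are below) =====
def Claim_equal_extract_balanced_div : Prop := ∀ (html : String) (start_idx : Int), Dom_extract_balanced_div html start_idx → Spec_extract_balanced_div html start_idx (extract_balanced_div html start_idx)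

-- ===== LEMMAS AND PROOFS =====

-- one-step unfolding of edbScan on a cons cell
theorem edbScan_cons (region : List Char) (ch : Char) (rest : List Char) (j : Nat) (pending depth : Int) :
    edbScan region (ch :: rest) j pending depth =
      (if pending ≠ 0 then
        if ch = '>' then
          let depth' := depth + pending
          if pending < 0 ∧ depth' = 0 then region.take (j + 1)
          else edbScan region rest (j + 1) 0 depth'
        else edbScan region rest (j + 1) pending depth
      else if PySem.Chars.startswith (ch :: rest) edbCloseTag then edbScan region rest (j + 1) (-1) depth
      else if PySem.Chars.startswith (ch :: rest) edbOpenTag then edbScan region rest (j + 1) 1 depth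
      else edbScan region rest (j + 1) 0 depth) := rfl

-- negative start clamps exactly like slice indices do
theorem edb_findFrom_neg (s sub : List Char) (st : Int) (h : st < 0) :
    PySem.Chars.findFrom s sub st none =
      PySem.Chars.findFrom s sub ((PySem.List.clampIdx s.length st : Nat) : Int) none := by
  rw [PySem.Chars.findFrom_natCast s sub _ (PySem.List.clampIdx_le _ _)]
  simp only [PySem.Chars.findFrom, if_pos h, Int.toNat_natCast, List.take_length]
  have h1 : ¬ ((s.length : Int) < if st + (s.length:Int) < 0 then 0 else st + (s.length:Int)) := by
    split_ifs <;> omega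
  rw [if_neg h1]
  have h2 : (if st + (s.length:Int) < 0 then 0 else st + (s.length:Int)).toNat
      = PySem.List.clampIdx s.length st := by
    simp only [PySem.List.clampIdx, if_pos h]
    split_ifs <;> omega
  have h3 : (if st + (s.length:Int) < 0 then 0 else st + (s.length:Int))
      = ((PySem.List.clampIdx s.length st : Nat) : Int) := by
    simp only [PySem.List.clampIdx, if_pos h]
    split_ifs <;> omega
  rw [h2, h3]

-- a prefix of a dropped tail is an infix
theorem edb_prefix_drop_infix {sub l : List Char} {m : Nat} (h : sub <+: l.drop m) : sub <:+: l :=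
  List.infix_iff_prefix_suffix.2 ⟨l.drop m, h, List.drop_suffix m l⟩

-- shifting `find` past a non-matching head
theorem edb_find_cons_shift (c : Char) (l sub : List Char) (h : ¬ sub <+: (c :: l)) :
    PySem.Chars.find (c :: l) sub =
      if PySem.Chars.find l sub = -1 then -1 else PySem.Chars.find l sub + 1 := by
  by_cases hin : sub <:+: l
  · have hin' : sub <:+: (c :: l) := List.infix_cons_iff.2 (Or.inr hin)
    have h1 : PySem.Chars.find (c :: l) sub ≠ -1 := by
      rw [Ne, PySem.Chars.find_eq_neg_one_iff]; exact not_not_intro hin'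
    have h2 : PySem.Chars.find l sub ≠ -1 := by
      rw [Ne, PySem.Chars.find_eq_neg_one_iff]; exact not_not_intro hin
    have hr := PySem.Chars.neg_one_le_find (c :: l) sub
    have hr' := PySem.Chars.neg_one_le_find l sub
    have hs := PySem.Chars.find_spec (s := c :: l) (sub := sub) (by omega)
    have hs' := PySem.Chars.find_spec (s := l) (sub := sub) (by omega)
    set r := PySem.Chars.find (c :: l) sub with hrdef
    set r' := PySem.Chars.find l sub with hrdef'
    have hr0 : r ≠ 0 := by
      intro h0
      exact h (by simpa [h0] using hs.1)
    -- prefix at position r in c::l gives prefix at r-1 in l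
    have hp : sub <+: l.drop (r.toNat - 1) := by
      have := hs.1
      rwa [show (c :: l).drop r.toNat = l.drop (r.toNat - 1) by
        cases hn : r.toNat with
        | zero => omega
        | succ m => simp] at this
    have hle : r'.toNat ≤ r.toNat - 1 := by
      by_contra hlt
      exact hs'.2 _ (by omega) hp
    have hp' : sub <+: (c :: l).drop (r'.toNat + 1) := by simpa using hs'.1
    have hge : r.toNat ≤ r'.toNat + 1 := by
      by_contra hlt
      exact hs.2 _ (by omega) hp'
    simp only [if_neg h2]
    omega
  · have h1 : PySem.Chars.find (c :: l) sub = -1 := by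
      rw [PySem.Chars.find_eq_neg_one_iff]
      intro hcon
      rcases List.infix_cons_iff.1 hcon with hc | hc
      · exact h hc
      · exact hin hc
    have h2 : PySem.Chars.find l sub = -1 := by
      rw [PySem.Chars.find_eq_neg_one_iff]; exact hin
    simp [h1, h2]

-- the two tags cannot both be prefixes of the same list
theorem edb_not_both (l : List Char) (ho : edbOpenTag <+: l) (hc : edbCloseTag <+: l) : False := by
  rcases ho with ⟨t1, ht1⟩
  rcases hc with ⟨t2, ht2⟩
  rw [← ht1] at ht2
  simp [edbOpenTag, edbCloseTag] at ht2

-- a successful find lands strictly inside the list (nonempty pattern)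
theorem edb_find_lt_length {l sub : List Char} (hsub : sub ≠ []) {g : Nat}
    (hg : PySem.Chars.find l sub = (g : Int)) : g < l.length := by
  have hs := PySem.Chars.find_spec (s := l) (sub := sub) (by omega)
  rw [hg] at hs
  simp only [Int.toNat_natCast] at hs
  rcases hs.1 with ⟨t, ht⟩
  have hlt : sub.length + t.length = (l.drop g).length := by rw [← ht]; simp
  have hlen : (l.drop g).length = l.length - g := by simp
  have hle := PySem.Chars.find_le_length l sub
  rw [hg] at hle
  cases sub with
  | nil => exact absurd rfl hsub
  | cons a b => simp only [List.length_cons] at hlt; omega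

-- B returns `region` when no '>' remains (pending set, scanning for the tag end)
theorem edb_scan_no_gt (region : List Char) (p d : Int) (hp : p ≠ 0) :
    ∀ rest j, rest = region.drop j → ¬ (['>'] <:+: rest) →
      edbScan region rest j p d = region := by
  intro rest
  induction rest with
  | nil => intro j _ _; rfl
  | cons c l ih =>
    intro j hj hno
    have hc : c ≠ '>' := by
      intro h
      exact hno (by simp [h, List.infix_cons_iff])
    have hl : l = region.drop (j + 1) := by
      simpa [List.tail_drop] using congrArg List.tail hj
    simp only [edbScan, if_pos hp, if_neg hc]
    exact ih (j + 1) hl (fun h => hno (List.infix_cons_iff.2 (Or.inr h)))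

-- B with pending set jumps to the first '>' (at relative offset g)
theorem edb_scan_gt (region : List Char) (p d : Int) (hp : p ≠ 0) :
    ∀ (g j : Nat), PySem.Chars.find (region.drop j) ['>'] = (g : Int) →
      edbScan region (region.drop j) j p d =
        (if p < 0 ∧ d + p = 0 then region.take (j + g + 1)
         else edbScan region (region.drop (j + g + 1)) (j + g + 1) 0 (d + p)) := by
  intro g
  induction g with
  | zero =>
    intro j hg
    have hlt := edb_find_lt_length (by simp) hg
    have hs := PySem.Chars.find_spec (s := region.drop j) (sub := ['>']) (by omega)
    rw [hg] at hs
    simp only [Nat.cast_zero, Int.toNat_zero, List.drop_zero] at hs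
    rcases hs.1 with ⟨t, ht⟩
    obtain ⟨l, hl⟩ : ∃ l, region.drop j = '>' :: l := ⟨t, by rw [← ht]; rfl⟩
    have hl' : region.drop (j + 1) = l := by
      simpa [List.tail_drop] using congrArg List.tail hl
    rw [hl]
    simp only [edbScan, if_pos hp]
    rw [← hl']
    have h01 : j + 0 + 1 = j + 1 := by omega
    rw [h01]
    simp
  | succ g ih =>
    intro j hg
    have hlt := edb_find_lt_length (by simp) hg
    obtain ⟨c, l, hl⟩ : ∃ c l, region.drop j = c :: l := by
      cases h : region.drop j with
      | nil =>
        have hle := PySem.Chars.find_le_length (region.drop j) ['>']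
        rw [h] at hg
        rw [h] at hle
        simp at hle
        omega
      | cons a b => exact ⟨a, b, rfl⟩
    have hs := PySem.Chars.find_spec (s := region.drop j) (sub := ['>']) (by omega)
    rw [hg] at hs
    simp only [Int.toNat_natCast] at hs
    have hc : c ≠ '>' := by
      intro h
      exact hs.2 0 (by omega) (by rw [hl, h]; simp)
    have hnp : ¬ (['>'] <+: region.drop j) := by
      rw [hl]
      rintro ⟨t, ht⟩
      exact hc (by injection ht with h _; exact h.symm)
    have hl' : region.drop (j + 1) = l := by
      simpa [List.tail_drop] using congrArg List.tail hl
    have hshift := edb_find_cons_shift c l ['>'] (by rwa [← hl])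
    rw [← hl] at hshift
    have hg' : PySem.Chars.find (region.drop (j + 1)) ['>'] = (g : Int) := by
      rw [hl']
      rw [hg] at hshift
      have hb := PySem.Chars.neg_one_le_find l ['>']
      split_ifs at hshift with h0
      all_goals omega
    rw [hl]
    simp only [edbScan, if_pos hp, if_neg hc]
    rw [← hl']
    rw [ih (j + 1) hg']
    have hx : j + 1 + g + 1 = j + (g + 1) + 1 := by omega
    rw [hx]

-- B with pending clear walks over p tag-free characters
theorem edb_scan_skip (region : List Char) (d : Int) :
    ∀ p j, j + p ≤ region.length →
      (∀ m : Nat, m < p → ¬ edbCloseTag <+: region.drop (j + m) ∧ ¬ edbOpenTag <+: region.drop (j + m)) →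
      edbScan region (region.drop j) j 0 d = edbScan region (region.drop (j + p)) (j + p) 0 d := by
  intro p
  induction p with
  | zero => intro j _ _; rfl
  | succ p ih =>
    intro j hlen hno
    obtain ⟨c, l, hl⟩ : ∃ c l, region.drop j = c :: l := by
      cases h : region.drop j with
      | nil =>
        have := List.drop_eq_nil_iff.1 h
        omega
      | cons a b => exact ⟨a, b, rfl⟩
    have h0 := hno 0 (by omega)
    simp only [Nat.add_zero] at h0
    have hl' : region.drop (j + 1) = l := by
      simpa [List.tail_drop] using congrArg List.tail hl
    rw [hl]
    simp only [edbScan, if_neg (by simp : ¬ ((0:Int) ≠ 0))]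
    rw [if_neg, if_neg]
    · rw [← hl']
      have hrec := ih (j + 1) (by omega) (fun m hm => by
        have := hno (m + 1) (by omega)
        rwa [show j + (m + 1) = j + 1 + m by omega] at this)
      rw [hrec, show j + 1 + p = j + (p + 1) by omega]
    · rw [← hl]
      intro h
      exact h0.2 ((PySem.Chars.startswith_iff _ _).1 h)
    · rw [← hl]
      intro h
      exact h0.1 ((PySem.Chars.startswith_iff _ _).1 h)

-- B returns `region` when no tag remains at all
theorem edb_scan_no_tag (region : List Char) (d : Int) :
    ∀ rest j, rest = region.drop j →
      ¬ (edbCloseTag <:+: rest) → ¬ (edbOpenTag <:+: rest) →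
      edbScan region rest j 0 d = region := by
  intro rest
  induction rest with
  | nil => intro j _ _ _; rfl
  | cons c l ih =>
    intro j hj hnc hno
    have hl' : region.drop (j + 1) = l := by
      simpa [List.tail_drop] using congrArg List.tail hj.symm
    simp only [edbScan, if_neg (by simp : ¬ ((0:Int) ≠ 0))]
    rw [if_neg, if_neg]
    · exact ih (j + 1) hl'.symm (fun h => hnc (List.infix_cons_iff.2 (Or.inr h)))
        (fun h => hno (List.infix_cons_iff.2 (Or.inr h)))
    · intro h
      exact hno (List.infix_cons_iff.2 (Or.inl ((PySem.Chars.startswith_iff _ _).1 h)))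
    · intro h
      exact hnc (List.infix_cons_iff.2 (Or.inl ((PySem.Chars.startswith_iff _ _).1 h)))

-- from a tag-free stretch, B walks to the open tag at relative offset foN,
-- then scans to the first '>' after it
theorem edb_open_jump (region : List Char) (d : Int) (j foN : Nat)
    (hfo : PySem.Chars.find (region.drop j) edbOpenTag = (foN : Int))
    (hother : ∀ m : Nat, m < foN → ¬ edbCloseTag <+: region.drop (j + m)) :
    edbScan region (region.drop j) j 0 d =
      (if PySem.Chars.find (region.drop (j + foN)) ['>'] = -1 then region
       else edbScan region
         (region.drop (j + foN + (PySem.Chars.find (region.drop (j + foN)) ['>']).toNat + 1))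
         (j + foN + (PySem.Chars.find (region.drop (j + foN)) ['>']).toNat + 1) 0 (d + 1)) := by
  have hlt := edb_find_lt_length (show edbOpenTag ≠ [] by simp [edbOpenTag]) hfo
  have hdl : (region.drop j).length = region.length - j := by simp
  have hs := PySem.Chars.find_spec (s := region.drop j) (sub := edbOpenTag) (by rw [hfo]; omega)
  rw [hfo] at hs
  simp only [Int.toNat_natCast] at hs
  rw [edb_scan_skip region d foN j (by omega) (fun m hm => by
    refine ⟨hother m hm, ?_⟩
    rw [← List.drop_drop]
    exact hs.2 m hm)]
  have hopen : edbOpenTag <+: region.drop (j + foN) := by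
    have := hs.1
    rwa [List.drop_drop] at this
  obtain ⟨t, ht⟩ := hopen
  have hq : region.drop (j + foN) = '<' :: ('d' :: 'i' :: 'v' :: t) := by rw [← ht]; rfl
  have hq1 : region.drop (j + foN + 1) = 'd' :: 'i' :: 'v' :: t := by
    simpa [List.tail_drop] using congrArg List.tail hq
  have hb := PySem.Chars.neg_one_le_find (region.drop (j + foN)) ['>']
  set gI := PySem.Chars.find (region.drop (j + foN)) ['>'] with hgI
  rw [hq, edbScan_cons]
  rw [if_neg (by simp : ¬ ((0:Int) ≠ 0)),
    if_neg (fun hcon => edb_not_both ('<' :: 'd' :: 'i' :: 'v' :: t) ⟨t, rfl⟩ ((PySem.Chars.startswith_iff _ _).1 hcon)),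
    if_pos ((PySem.Chars.startswith_iff ('<' :: 'd' :: 'i' :: 'v' :: t) edbOpenTag).2 ⟨t, rfl⟩)]
  rw [← hq1]
  by_cases hg : gI = -1
  · rw [if_pos hg]
    refine edb_scan_no_gt region 1 d (by norm_num) _ (j + foN + 1) rfl ?_
    intro hcon
    have hgneg : PySem.Chars.find (region.drop (j + foN)) ['>'] = -1 := by rw [← hgI]; exact hg
    refine (PySem.Chars.find_eq_neg_one_iff _ _).mp hgneg ?_
    refine hcon.trans ?_
    rw [show region.drop (j + foN + 1) = (region.drop (j + foN)).drop 1 by rw [List.drop_drop]]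
    exact (List.drop_suffix 1 _).isInfix
  · have hsh := edb_find_cons_shift '<' ('d' :: 'i' :: 'v' :: t) ['>'] (by
      rintro ⟨t2, ht2⟩
      simp at ht2)
    rw [← hq, ← hgI] at hsh
    have hb1 := PySem.Chars.neg_one_le_find ('d' :: 'i' :: 'v' :: t) ['>']
    have h1g : 1 ≤ gI.toNat ∧
        PySem.Chars.find (region.drop (j + foN + 1)) ['>'] = ((gI.toNat - 1 : Nat) : Int) := by
      rw [hq1]
      split_ifs at hsh <;> constructor <;> omega
    rw [edb_scan_gt region 1 d (by norm_num) (gI.toNat - 1) (j + foN + 1) h1g.2]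
    rw [if_neg (by norm_num), if_neg hg]
    rw [show j + foN + 1 + (gI.toNat - 1) + 1 = j + foN + gI.toNat + 1 by omega]

-- same for the close tag: B walks to it, scans to its '>', and either returns the
-- balanced prefix (depth hits zero) or continues with depth - 1
theorem edb_close_jump (region : List Char) (d : Int) (j fcN : Nat)
    (hfc : PySem.Chars.find (region.drop j) edbCloseTag = (fcN : Int))
    (hother : ∀ m : Nat, m < fcN → ¬ edbOpenTag <+: region.drop (j + m)) :
    edbScan region (region.drop j) j 0 d =
      (if PySem.Chars.find (region.drop (j + fcN)) ['>'] = -1 then region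
       else if d - 1 = 0 then
         region.take (j + fcN + (PySem.Chars.find (region.drop (j + fcN)) ['>']).toNat + 1)
       else edbScan region
         (region.drop (j + fcN + (PySem.Chars.find (region.drop (j + fcN)) ['>']).toNat + 1))
         (j + fcN + (PySem.Chars.find (region.drop (j + fcN)) ['>']).toNat + 1) 0 (d - 1)) := by
  have hlt := edb_find_lt_length (show edbCloseTag ≠ [] by simp [edbCloseTag]) hfc
  have hdl : (region.drop j).length = region.length - j := by simp
  have hs := PySem.Chars.find_spec (s := region.drop j) (sub := edbCloseTag) (by rw [hfc]; omega)
  rw [hfc] at hs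
  simp only [Int.toNat_natCast] at hs
  rw [edb_scan_skip region d fcN j (by omega) (fun m hm => by
    refine ⟨?_, hother m hm⟩
    rw [← List.drop_drop]
    exact hs.2 m hm)]
  have hclose : edbCloseTag <+: region.drop (j + fcN) := by
    have := hs.1
    rwa [List.drop_drop] at this
  obtain ⟨t, ht⟩ := hclose
  have hq : region.drop (j + fcN) = '<' :: ('/' :: 'd' :: 'i' :: 'v' :: t) := by rw [← ht]; rfl
  have hq1 : region.drop (j + fcN + 1) = '/' :: 'd' :: 'i' :: 'v' :: t := by
    simpa [List.tail_drop] using congrArg List.tail hq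
  have hb := PySem.Chars.neg_one_le_find (region.drop (j + fcN)) ['>']
  set gI := PySem.Chars.find (region.drop (j + fcN)) ['>'] with hgI
  rw [hq, edbScan_cons]
  rw [if_neg (by simp : ¬ ((0:Int) ≠ 0)),
    if_pos ((PySem.Chars.startswith_iff ('<' :: '/' :: 'd' :: 'i' :: 'v' :: t) edbCloseTag).2 ⟨t, rfl⟩)]
  rw [← hq1]
  by_cases hg : gI = -1
  · rw [if_pos hg]
    refine edb_scan_no_gt region (-1) d (by norm_num) _ (j + fcN + 1) rfl ?_
    intro hcon
    have hgneg : PySem.Chars.find (region.drop (j + fcN)) ['>'] = -1 := by rw [← hgI]; exact hg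
    refine (PySem.Chars.find_eq_neg_one_iff _ _).mp hgneg ?_
    refine hcon.trans ?_
    rw [show region.drop (j + fcN + 1) = (region.drop (j + fcN)).drop 1 by rw [List.drop_drop]]
    exact (List.drop_suffix 1 _).isInfix
  · have hsh := edb_find_cons_shift '<' ('/' :: 'd' :: 'i' :: 'v' :: t) ['>'] (by
      rintro ⟨t2, ht2⟩
      simp at ht2)
    rw [← hq, ← hgI] at hsh
    have hb1 := PySem.Chars.neg_one_le_find ('/' :: 'd' :: 'i' :: 'v' :: t) ['>']
    have h1g : 1 ≤ gI.toNat ∧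
        PySem.Chars.find (region.drop (j + fcN + 1)) ['>'] = ((gI.toNat - 1 : Nat) : Int) := by
      rw [hq1]
      split_ifs at hsh <;> constructor <;> omega
    rw [edb_scan_gt region (-1) d (by norm_num) (gI.toNat - 1) (j + fcN + 1) h1g.2]
    rw [if_neg hg]
    rw [show j + fcN + 1 + (gI.toNat - 1) + 1 = j + fcN + gI.toNat + 1 by omega]
    by_cases hd : d - 1 = 0
    · rw [if_pos ⟨by norm_num, by omega⟩, if_pos hd]
    · rw [if_neg (by push Not; intro _; omega), if_neg hd]
      rw [show d + -1 = d - 1 by ring]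

-- A's slice html[start_idx : sN + r] is a take on the region
theorem edb_slice_take (hl : List Char) (start : Int) (sN : Nat)
    (hsN : sN = PySem.List.clampIdx hl.length start) (r : Nat) (hr : sN + r ≤ hl.length) :
    PySem.List.slice hl (some start) (some ((sN + r : Nat) : Int)) = (hl.drop sN).take r := by
  simp only [PySem.List.slice]
  rw [← hsN, PySem.List.clampIdx_natCast]
  have h1 : min (sN + r) hl.length = sN + r := by omega
  have h2 : sN + r - sN = r := by omega
  rw [h1, h2]

-- the central simulation: A's loop at absolute index sN + j equals B's scan at relative j
theorem edb_main (hl : List Char) (start : Int) (sN : Nat) (hsN : sN = PySem.List.clampIdx hl.length start) :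
    ∀ j d, j ≤ (hl.drop sN).length →
      edbLoop hl start ((sN : Int) + (j : Int)) d = edbScan (hl.drop sN) ((hl.drop sN).drop j) j 0 d := by
  have hsn : sN ≤ hl.length := by rw [hsN]; exact PySem.List.clampIdx_le _ _
  have hrl : (hl.drop sN).length = hl.length - sN := by simp
  have hslice : PySem.List.slice hl (some start) none = hl.drop sN := by
    rw [PySem.List.slice_some_none, ← hsN]
  have hdd : ∀ a : Nat, List.drop (sN + a) hl = (hl.drop sN).drop a := by
    intro a; rw [List.drop_drop]
  have base : ∀ (j : Nat) (d : Int), (hl.drop sN).length ≤ j →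
      edbLoop hl start ((sN : Int) + (j : Int)) d = edbScan (hl.drop sN) ((hl.drop sN).drop j) j 0 d := by
    intro j d hj
    rw [edbLoop.eq_def, dif_neg (by omega)]
    rw [List.drop_eq_nil_of_le (by omega : (hl.drop sN).length ≤ j)]
    rw [hslice]
    rfl
  suffices H : ∀ fuel (j : Nat) (d : Int), (hl.drop sN).length - j ≤ fuel → j ≤ (hl.drop sN).length →
      edbLoop hl start ((sN : Int) + (j : Int)) d = edbScan (hl.drop sN) ((hl.drop sN).drop j) j 0 d by
    intro j d hj
    exact H ((hl.drop sN).length - j) j d le_rfl hj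
  intro fuel
  induction fuel with
  | zero =>
    intro j d hf hj
    exact base j d (by omega)
  | succ fuel ih =>
    intro j d hf hj
    by_cases hjl : j < (hl.drop sN).length
    case neg => exact base j d (by omega)
    case pos =>
    have hcast : ((sN : Int) + (j : Int)) = ((sN + j : Nat) : Int) := by push_cast; ring
    rw [hcast, edbLoop.eq_def, dif_pos (by omega : ((sN + j : Nat) : Int) < (hl.length : Int))]
    simp only []
    rw [PySem.Chars.findFrom_natCast hl ['<', '/', 'd', 'i', 'v'] (sN + j) (by omega),
        PySem.Chars.findFrom_natCast hl ['<', 'd', 'i', 'v'] (sN + j) (by omega),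
        hdd j]
    rw [show (['<', '/', 'd', 'i', 'v'] : List Char) = edbCloseTag from rfl,
        show (['<', 'd', 'i', 'v'] : List Char) = edbOpenTag from rfl]
    have hfo_lb := PySem.Chars.neg_one_le_find ((hl.drop sN).drop j) edbOpenTag
    have hfc_lb := PySem.Chars.neg_one_le_find ((hl.drop sN).drop j) edbCloseTag
    have hdlj : ((hl.drop sN).drop j).length = (hl.drop sN).length - j := by simp; omega
    by_cases hfo : PySem.Chars.find ((hl.drop sN).drop j) edbOpenTag = -1
    · by_cases hfc : PySem.Chars.find ((hl.drop sN).drop j) edbCloseTag = -1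
      · -- no tag at all: A returns the suffix, B scans to the end
        rw [if_pos ⟨by rw [if_pos hfo], by rw [if_pos hfc]⟩, hslice]
        exact (edb_scan_no_tag _ d _ j rfl ((PySem.Chars.find_eq_neg_one_iff _ _).1 hfc)
          ((PySem.Chars.find_eq_neg_one_iff _ _).1 hfo)).symm
      · -- only a close tag ahead
        obtain ⟨fcN, hfcN⟩ : ∃ k : Nat, PySem.Chars.find ((hl.drop sN).drop j) edbCloseTag = (k : Int) :=
          ⟨(PySem.Chars.find ((hl.drop sN).drop j) edbCloseTag).toNat, by omega⟩
        have hfcl := edb_find_lt_length (show edbCloseTag ≠ [] by simp [edbCloseTag]) hfcN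
        rw [hfcN, if_pos hfo, if_neg (by omega : ¬ ((fcN : Int) = -1))]
        rw [if_neg (by rintro ⟨-, hcon⟩; omega), dif_neg (by rintro ⟨hcon, -⟩; exact hcon rfl)]
        rw [show ((sN + j : Nat) : Int) + (fcN : Int) = ((sN + (j + fcN) : Nat) : Int) by push_cast; ring]
        rw [PySem.Chars.findFrom_natCast hl ['>'] (sN + (j + fcN)) (by omega), hdd (j + fcN)]
        rw [edb_close_jump (hl.drop sN) d j fcN hfcN (fun m _ hcon =>
          (PySem.Chars.find_eq_neg_one_iff _ _).1 hfo
            (by rw [← List.drop_drop] at hcon; exact edb_prefix_drop_infix hcon))]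
        have hgb := PySem.Chars.neg_one_le_find ((hl.drop sN).drop (j + fcN)) ['>']
        have hdl2 : ((hl.drop sN).drop (j + fcN)).length = (hl.drop sN).length - (j + fcN) := by simp; omega
        by_cases hg : PySem.Chars.find ((hl.drop sN).drop (j + fcN)) ['>'] = -1
        · rw [if_pos hg, if_pos hg, dif_pos rfl, hslice]
        · obtain ⟨gN, hgN⟩ : ∃ k : Nat, PySem.Chars.find ((hl.drop sN).drop (j + fcN)) ['>'] = (k : Int) :=
            ⟨(PySem.Chars.find ((hl.drop sN).drop (j + fcN)) ['>']).toNat, by omega⟩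
          have hglt := edb_find_lt_length (by simp : (['>'] : List Char) ≠ []) hgN
          rw [hgN]
          simp only [Int.toNat_natCast]
          rw [if_neg (by omega : ¬ ((gN : Int) = -1)), if_neg (by omega : ¬ ((gN : Int) = -1)),
            dif_neg (by omega : ¬ ((sN + (j + fcN) : Nat) : Int) + (gN : Int) = -1)]
          by_cases hd : d - 1 = 0
          · rw [if_pos hd, if_pos hd]
            rw [show ((sN + (j + fcN) : Nat) : Int) + (gN : Int) + 1 = ((sN + (j + fcN + gN + 1) : Nat) : Int) by push_cast; ring]
            rw [edb_slice_take hl start sN hsN (j + fcN + gN + 1) (by omega)]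
          · rw [if_neg hd, if_neg hd]
            rw [show ((sN + (j + fcN) : Nat) : Int) + (gN : Int) + 1 = (sN : Int) + ((j + fcN + gN + 1 : Nat) : Int) by push_cast; ring]
            exact ih (j + fcN + gN + 1) (d - 1) (by omega) (by omega)
    · -- an open tag ahead
      obtain ⟨foN, hfoN⟩ : ∃ k : Nat, PySem.Chars.find ((hl.drop sN).drop j) edbOpenTag = (k : Int) :=
        ⟨(PySem.Chars.find ((hl.drop sN).drop j) edbOpenTag).toNat, by omega⟩
      have hfol := edb_find_lt_length (show edbOpenTag ≠ [] by simp [edbOpenTag]) hfoN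
      have hso := PySem.Chars.find_spec (s := (hl.drop sN).drop j) (sub := edbOpenTag)
        (by rw [hfoN]; omega)
      rw [hfoN] at hso
      simp only [Int.toNat_natCast] at hso
      have openStep : ∀ hother : (∀ m : Nat, m < foN → ¬ edbCloseTag <+: (hl.drop sN).drop (j + m)),
          (if he : PySem.Chars.findFrom hl ['>'] (((sN + j : Nat) : Int) + (foN : Int)) none = -1 then
            PySem.List.slice hl (some start) none
          else edbLoop hl start (PySem.Chars.findFrom hl ['>'] (((sN + j : Nat) : Int) + (foN : Int)) none + 1) (d + 1))
          = edbScan (hl.drop sN) ((hl.drop sN).drop j) j 0 d := by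
        intro hother
        rw [show ((sN + j : Nat) : Int) + (foN : Int) = ((sN + (j + foN) : Nat) : Int) by push_cast; ring]
        rw [PySem.Chars.findFrom_natCast hl ['>'] (sN + (j + foN)) (by omega), hdd (j + foN)]
        rw [edb_open_jump (hl.drop sN) d j foN hfoN hother]
        have hgb := PySem.Chars.neg_one_le_find ((hl.drop sN).drop (j + foN)) ['>']
        have hdl2 : ((hl.drop sN).drop (j + foN)).length = (hl.drop sN).length - (j + foN) := by simp; omega
        by_cases hg : PySem.Chars.find ((hl.drop sN).drop (j + foN)) ['>'] = -1
        · rw [if_pos hg, if_pos hg, dif_pos rfl, hslice]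
        · obtain ⟨gN, hgN⟩ : ∃ k : Nat, PySem.Chars.find ((hl.drop sN).drop (j + foN)) ['>'] = (k : Int) :=
            ⟨(PySem.Chars.find ((hl.drop sN).drop (j + foN)) ['>']).toNat, by omega⟩
          have hglt := edb_find_lt_length (by simp : (['>'] : List Char) ≠ []) hgN
          rw [hgN]
          simp only [Int.toNat_natCast]
          rw [if_neg (by omega : ¬ ((gN : Int) = -1))]
          rw [dif_neg (by omega : ¬ (((sN + (j + foN) : Nat) : Int) + (gN : Int) = -1))]
          rw [show ((sN + (j + foN) : Nat) : Int) + (gN : Int) + 1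
              = (sN : Int) + ((j + foN + gN + 1 : Nat) : Int) by push_cast; ring]
          exact ih (j + foN + gN + 1) (d + 1) (by omega) (by omega)
      by_cases hfc : PySem.Chars.find ((hl.drop sN).drop j) edbCloseTag = -1
      · -- no close tag at all: open branch
        rw [hfoN, if_pos hfc, if_neg (by omega : ¬ ((foN : Int) = -1))]
        rw [if_neg (by rintro ⟨hcon, -⟩; omega),
          dif_pos ⟨by omega, Or.inl rfl⟩]
        exact openStep (fun m _ hcon =>
          (PySem.Chars.find_eq_neg_one_iff _ _).1 hfc
            (by rw [← List.drop_drop] at hcon; exact edb_prefix_drop_infix hcon))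
      · obtain ⟨fcN, hfcN⟩ : ∃ k : Nat, PySem.Chars.find ((hl.drop sN).drop j) edbCloseTag = (k : Int) :=
          ⟨(PySem.Chars.find ((hl.drop sN).drop j) edbCloseTag).toNat, by omega⟩
        have hfcl := edb_find_lt_length (show edbCloseTag ≠ [] by simp [edbCloseTag]) hfcN
        have hsc := PySem.Chars.find_spec (s := (hl.drop sN).drop j) (sub := edbCloseTag)
          (by rw [hfcN]; omega)
        rw [hfcN] at hsc
        simp only [Int.toNat_natCast] at hsc
        have hne : foN ≠ fcN := by
          intro h
          exact edb_not_both _ hso.1 (h ▸ hsc.1)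
        rcases Nat.lt_or_ge foN fcN with hof | hof
        · -- open tag first
          rw [hfoN, hfcN, if_neg (by omega : ¬ ((foN : Int) = -1)), if_neg (by omega : ¬ ((fcN : Int) = -1))]
          rw [if_neg (by rintro ⟨hcon, -⟩; omega),
            dif_pos ⟨by omega, Or.inr (by omega)⟩]
          exact openStep (fun m hm hcon => by
            rw [← List.drop_drop] at hcon
            exact hsc.2 m (by omega) hcon)
        · -- close tag first
          have hco : fcN < foN := by omega
          rw [hfoN, hfcN, if_neg (by omega : ¬ ((foN : Int) = -1)), if_neg (by omega : ¬ ((fcN : Int) = -1))]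
          rw [if_neg (by rintro ⟨hcon, -⟩; omega),
            dif_neg (by rintro ⟨-, hor⟩; rcases hor with h | h <;> omega)]
          rw [show ((sN + j : Nat) : Int) + (fcN : Int) = ((sN + (j + fcN) : Nat) : Int) by push_cast; ring]
          rw [PySem.Chars.findFrom_natCast hl ['>'] (sN + (j + fcN)) (by omega), hdd (j + fcN)]
          rw [edb_close_jump (hl.drop sN) d j fcN hfcN (fun m hm hcon => by
            rw [← List.drop_drop] at hcon
            exact hso.2 m (by omega) hcon)]
          have hgb := PySem.Chars.neg_one_le_find ((hl.drop sN).drop (j + fcN)) ['>']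
          have hdl2 : ((hl.drop sN).drop (j + fcN)).length = (hl.drop sN).length - (j + fcN) := by simp; omega
          by_cases hg : PySem.Chars.find ((hl.drop sN).drop (j + fcN)) ['>'] = -1
          · rw [if_pos hg, if_pos hg, dif_pos rfl, hslice]
          · obtain ⟨gN, hgN⟩ : ∃ k : Nat, PySem.Chars.find ((hl.drop sN).drop (j + fcN)) ['>'] = (k : Int) :=
              ⟨(PySem.Chars.find ((hl.drop sN).drop (j + fcN)) ['>']).toNat, by omega⟩
            have hglt := edb_find_lt_length (by simp : (['>'] : List Char) ≠ []) hgN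
            rw [hgN]
            simp only [Int.toNat_natCast]
            rw [if_neg (by omega : ¬ ((gN : Int) = -1)), if_neg (by omega : ¬ ((gN : Int) = -1)),
              dif_neg (by omega : ¬ ((sN + (j + fcN) : Nat) : Int) + (gN : Int) = -1)]
            by_cases hd : d - 1 = 0
            · rw [if_pos hd, if_pos hd]
              rw [show ((sN + (j + fcN) : Nat) : Int) + (gN : Int) + 1 = ((sN + (j + fcN + gN + 1) : Nat) : Int) by push_cast; ring]
              rw [edb_slice_take hl start sN hsN (j + fcN + gN + 1) (by omega)]
            · rw [if_neg hd, if_neg hd]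
              rw [show ((sN + (j + fcN) : Nat) : Int) + (gN : Int) + 1 = (sN : Int) + ((j + fcN + gN + 1 : Nat) : Int) by push_cast; ring]
              exact ih (j + fcN + gN + 1) (d - 1) (by omega) (by omega)

-- normalizing A's first index to the clamped start
theorem edb_norm (hl : List Char) (start : Int) (d : Int) :
    edbLoop hl start start d = edbLoop hl start ((PySem.List.clampIdx hl.length start : Nat) : Int) d := by
  by_cases h0 : 0 ≤ start
  · by_cases h1 : start ≤ (hl.length : Int)
    · have he : ((PySem.List.clampIdx hl.length start : Nat) : Int) = start := by
        simp only [PySem.List.clampIdx]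
        split_ifs <;> omega
      rw [he]
    · -- start past the end: both sides take the else branch
      have hc : PySem.List.clampIdx hl.length start = hl.length := by
        simp only [PySem.List.clampIdx]
        split_ifs <;> omega
      rw [edbLoop.eq_def, edbLoop.eq_def, hc]
      rw [dif_neg (by omega), dif_neg (by omega)]
  · -- negative start: the finds and the loop guard clamp identically
    push Not at h0
    by_cases hn : hl.length = 0
    · -- empty string: A enters the loop once, both finds miss, both sides return the slice
      have hnil : hl = [] := List.length_eq_zero_iff.mp hn
      have hc : PySem.List.clampIdx hl.length start = 0 := by
        simp only [PySem.List.clampIdx]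
        split_ifs <;> omega
      rw [edbLoop.eq_def, edbLoop.eq_def, hc]
      rw [dif_pos (by simp [hn]; omega), dif_neg (by simp [hnil])]
      have ho : PySem.Chars.findFrom hl ['<', 'd', 'i', 'v'] start none = -1 := by
        rw [edb_findFrom_neg hl _ start h0, hc,
          PySem.Chars.findFrom_natCast hl _ 0 (by omega)]
        rw [hnil]
        simp [PySem.Chars.find_eq_neg_one_iff]
      have hcl : PySem.Chars.findFrom hl ['<', '/', 'd', 'i', 'v'] start none = -1 := by
        rw [edb_findFrom_neg hl _ start h0, hc,
          PySem.Chars.findFrom_natCast hl _ 0 (by omega)]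
        rw [hnil]
        simp [PySem.Chars.find_eq_neg_one_iff]
      rw [ho, hcl]
      simp
    · -- nonempty string: both guards hold and the clamped finds agree
      have hlt : ((PySem.List.clampIdx hl.length start : Nat) : Int) < (hl.length : Int) := by
        simp only [PySem.List.clampIdx]
        split_ifs <;> omega
      rw [edbLoop.eq_def, edbLoop.eq_def]
      rw [dif_pos (by omega), dif_pos hlt]
      rw [edb_findFrom_neg hl ['<', 'd', 'i', 'v'] start h0,
        edb_findFrom_neg hl ['<', '/', 'd', 'i', 'v'] start h0]

-- ===== VERDICT (by name: the statement is the Claim_ definition above) =====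
theorem extract_balanced_div_spec : Claim_equal_extract_balanced_div := by
  intro html start_idx _
  unfold Spec_extract_balanced_div extract_balanced_div extract_balanced_div_alt
  rw [edb_norm]
  rw [PySem.List.slice_some_none]
  have := edb_main html.toList start_idx (PySem.List.clampIdx html.toList.length start_idx) rfl 0 0 (by omega)
  simp only [Nat.cast_zero, add_zero, List.drop_zero] at this
  rw [this]
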